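-- pv_equiv track=rewrite | github.com/starco76/analyser3 | new_main.py | extra_data
-- ===== SOURCE A (Python) =====
-- def extra_data(data):
--     counter=0
--     less2=[]
--     for  i in data:
--         if i<2:
--             counter+=1
--         elif counter>0:
--             less2+=[counter]
--             counter=0
--
--     more2=[]
--     counter=0
--     for  i in data:
--         if i>=2:
--             counter+=1
--         elif counter>0:
--                 more2+=[counter]
--
--                 counter=0
--
--     rless2={}
--     for i in set(less2):
--         rless2.update({i:less2.count(i)})
--
--     rmore2={}
--     for i in set(more2):
--             rmore2.update({i:more2.count(i)})
--
--     return rless2 , rmore2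
-- ===== SOURCE B (Python) =====
-- from itertools import groupby
-- from collections import Counter
--
--
-- def extra_data(data):
--     # One pass: run-length encode by the predicate x < 2; the final run is
--     # never flushed by this analysis, so drop it.
--     runs = [(key, sum(1 for _ in grp)) for key, grp in groupby(data, key=lambda x: x < 2)]
--     complete = runs[:-1]
--     less2 = Counter(n for key, n in complete if key)
--     more2 = Counter(n for key, n in complete if not key)
--     return dict(less2), dict(more2)
-- ===== Notes on version B (the rewrite author's own statement) =====
-- stated objective: idiomatic
-- what changed: Replaces A's two separate flush-on-boundary passes over data and its quadratic set/list.count frequency loops by a single groupby-style run-length-encoding pass (dropping the never-flushed final run) followed by Counter.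
import Mathlib
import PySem

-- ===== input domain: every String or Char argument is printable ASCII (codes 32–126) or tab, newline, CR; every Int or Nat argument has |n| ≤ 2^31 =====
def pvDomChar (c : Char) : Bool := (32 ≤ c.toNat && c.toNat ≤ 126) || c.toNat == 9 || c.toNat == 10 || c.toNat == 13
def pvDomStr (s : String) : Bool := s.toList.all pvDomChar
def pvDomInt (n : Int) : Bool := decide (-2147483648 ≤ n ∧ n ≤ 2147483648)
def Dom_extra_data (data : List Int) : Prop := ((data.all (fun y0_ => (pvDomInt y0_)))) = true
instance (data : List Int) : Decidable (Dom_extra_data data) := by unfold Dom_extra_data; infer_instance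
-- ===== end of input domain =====

-- B replaces A's two flush-on-boundary passes and quadratic set/count frequency loops by a
-- single run-length-encoding pass (groupby) plus Counter (objective: idiomatic/alternative).

-- ===== PORT A =====
-- first loop: counter/less2 accumulator over data
def extra_data_pass1 (data : List Int) : Int × List Int :=
  data.foldl (fun (s : Int × List Int) i =>
    if i < 2 then (s.1 + 1, s.2)
    else if s.1 > 0 then (0, s.2 ++ [s.1])
    else s) (0, [])

-- second loop: counter/more2 accumulator over data
def extra_data_pass2 (data : List Int) : Int × List Int :=
  data.foldl (fun (s : Int × List Int) i =>
    if 2 ≤ i then (s.1 + 1, s.2)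
    else if s.1 > 0 then (0, s.2 ++ [s.1])
    else s) (0, [])

-- 'for i in set(l): r.update({i: l.count(i)})' (dict result: order immaterial under the comparison)
def extra_data_freq (l : List Int) : PySem.Dict Int Int :=
  (PySem.Set.ofList l).foldl (fun d i => d.insert i ((l.count i : Int))) PySem.Dict.empty

def extra_data (data : List Int) : (List (Int × Int)) × (List (Int × Int)) :=
  let less2 := (extra_data_pass1 data).2
  let more2 := (extra_data_pass2 data).2
  ((extra_data_freq less2).items, (extra_data_freq more2).items)

-- ===== PORT B =====
-- groupby(data, key=lambda x: x < 2) materialised as (key, length) pairs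
def runsGo (k : Bool) (n : Int) : List Int → List (Bool × Int)
  | [] => [(k, n)]
  | x :: xs =>
      if decide (x < 2) = k then runsGo k (n + 1) xs
      else (k, n) :: runsGo (decide (x < 2)) 1 xs

def runs : List Int → List (Bool × Int)
  | [] => []
  | x :: xs => runsGo (decide (x < 2)) 1 xs

def extra_data_alt (data : List Int) : (List (Int × Int)) × (List (Int × Int)) :=
  let complete := (runs data).dropLast      -- runs[:-1]
  let less2 := (complete.filter (fun p => p.1)).map Prod.snd
  let more2 := (complete.filter (fun p => !p.1)).map Prod.snd
  ((PySem.Dict.counter less2).items, (PySem.Dict.counter more2).items)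

-- ===== PRECONDITION & SPEC =====
def Spec_extra_data (data : List Int) (out : (List (Int × Int)) × (List (Int × Int))) : Prop := out = extra_data_alt data
instance (data : List Int) (out : (List (Int × Int)) × (List (Int × Int))) : Decidable (Spec_extra_data data out) := by unfold Spec_extra_data; infer_instance

-- ===== CLAIM (what is proved, stated in full; the proofs are below) =====
def Claim_equal_extra_data : Prop := ∀ (data : List Int), Dom_extra_data data → Spec_extra_data data (extra_data data)

-- ===== LEMMAS AND PROOFS =====

def pvStep (b : Bool) (s : Int × List Int) (x : Int) : Int × List Int :=
  if decide (x < 2) = b then (s.1 + 1, s.2)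
  else if s.1 > 0 then (0, s.2 ++ [s.1])
  else s

def pvTail (b : Bool) : List (Bool × Int) → Int
  | [] => 0
  | [(k, m)] => if k = b then m else 0
  | _ :: r :: rs => pvTail b (r :: rs)

theorem runsGo_ne_nil (k : Bool) (n : Int) (xs : List Int) : runsGo k n xs ≠ [] := by
  induction xs generalizing k n with
  | nil => simp [runsGo]
  | cons x t ih => simp only [runsGo]; split <;> simp [ih]

theorem pvGo (b : Bool) (xs : List Int) (k : Bool) (n : Int) (acc : List Int) (hn : 0 < n) :
    xs.foldl (pvStep b) ((if k = b then n else 0), acc)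
      = (pvTail b (runsGo k n xs),
         acc ++ (((runsGo k n xs).dropLast.filter (fun p => p.1 = b)).map Prod.snd)) := by
  induction xs generalizing k n acc with
  | nil => simp [runsGo, pvTail]
  | cons x t ih =>
    rw [List.foldl_cons]
    simp only [runsGo]
    by_cases hx : decide (x < 2) = k
    · rw [if_pos hx]
      have hstep : pvStep b ((if k = b then n else 0), acc) x
          = ((if k = b then n + 1 else 0), acc) := by
        by_cases hk : k = b
        · rw [if_pos hk, if_pos hk]
          unfold pvStep
          rw [if_pos (hx.trans hk)]
        · rw [if_neg hk, if_neg hk]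
          unfold pvStep
          rw [if_neg (fun h => hk (hx ▸ h)), if_neg (by omega)]
      rw [hstep, ih k (n + 1) acc (by omega)]
    · rw [if_neg hx]
      have hne := runsGo_ne_nil (decide (x < 2)) 1 t
      have hdl : ((k, n) :: runsGo (decide (x < 2)) 1 t).dropLast
          = (k, n) :: (runsGo (decide (x < 2)) 1 t).dropLast := by
        cases h : runsGo (decide (x < 2)) 1 t with
        | nil => exact absurd h hne
        | cons a l => simp [List.dropLast]
      have htail : pvTail b ((k, n) :: runsGo (decide (x < 2)) 1 t)
          = pvTail b (runsGo (decide (x < 2)) 1 t) := by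
        cases h : runsGo (decide (x < 2)) 1 t with
        | nil => exact absurd h hne
        | cons a l => rfl
      rw [hdl, htail]
      by_cases hk : k = b
      · have hxb : ¬ decide (x < 2) = b := fun h => hx (h.trans hk.symm)
        have hstep : pvStep b ((if k = b then n else 0), acc) x = (0, acc ++ [n]) := by
          rw [if_pos hk]
          unfold pvStep
          rw [if_neg hxb, if_pos (by omega : (n : Int) > 0)]
        have h0 : (0 : Int) = if decide (x < 2) = b then 1 else 0 := (if_neg hxb).symm
        rw [hstep, h0, ih (decide (x < 2)) 1 (acc ++ [n]) (by omega)]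
        rw [List.filter_cons]
        have : decide ((k, n).1 = b) = true := by simp [hk]
        rw [this]
        simp [List.append_assoc]
      · have hxb : decide (x < 2) = b := by
          cases k <;> cases b <;> cases h2 : decide (x < 2) <;> simp_all <;> omega
        have hstep : pvStep b ((if k = b then n else 0), acc) x = (0 + 1, acc) := by
          rw [if_neg hk]
          unfold pvStep
          rw [if_pos hxb]
        have h1 : (0 + 1 : Int) = if decide (x < 2) = b then 1 else 0 := by
          rw [if_pos hxb]; norm_num
        rw [hstep, h1, ih (decide (x < 2)) 1 acc (by omega)]
        rw [List.filter_cons]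
        have : decide ((k, n).1 = b) = false := by simp [hk]
        rw [this, if_neg Bool.false_ne_true]

theorem pvPass (b : Bool) (data : List Int) :
    (data.foldl (pvStep b) (0, [])).2
      = ((runs data).dropLast.filter (fun p => p.1 = b)).map Prod.snd := by
  cases data with
  | nil => simp [runs]
  | cons x t =>
    rw [List.foldl_cons]
    simp only [runs]
    have hstep : pvStep b ((0 : Int), ([] : List Int)) x
        = ((if decide (x < 2) = b then 1 else 0), []) := by
      by_cases hx : decide (x < 2) = b
      · unfold pvStep
        rw [if_pos hx, if_pos hx]
        norm_num
      · unfold pvStep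
        rw [if_neg hx, if_neg hx, if_neg (by omega : ¬ ((0 : Int), ([] : List Int)).1 > 0)]
    rw [hstep, pvGo b t (decide (x < 2)) 1 [] (by omega)]
    rw [List.nil_append]

theorem pass1_eq (data : List Int) :
    extra_data_pass1 data = data.foldl (pvStep true) (0, []) := by
  unfold extra_data_pass1
  apply PySem.List.foldl_congr_mem
  intro s x _
  by_cases h : x < 2 <;> simp [pvStep, h]

theorem pass2_eq (data : List Int) :
    extra_data_pass2 data = data.foldl (pvStep false) (0, []) := by
  unfold extra_data_pass2
  apply PySem.List.foldl_congr_mem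
  intro s x _
  by_cases h : x < 2
  · have h2 : ¬ (2 ≤ x) := by omega
    simp [pvStep, h, h2]
  · have h2 : 2 ≤ x := by omega
    simp [pvStep, h, h2]

theorem freq_items_eq (l : List Int) :
    (extra_data_freq l).items = (PySem.Dict.counter l).items := by
  unfold extra_data_freq
  have h1 : ∀ a ∈ PySem.Set.ofList l,
      (PySem.Dict.empty : PySem.Dict Int Int).contains a = false := by
    intro a _; simp [pysem]
  have h2 : ((PySem.Set.ofList l).map (fun a => a)).Nodup := by
    simpa using PySem.Set.nodup_ofList l
  rw [PySem.Dict.items_foldl_insert_fresh (PySem.Set.ofList l) (fun a => a)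
        (fun a => ((l.count a : Int))) PySem.Dict.empty h1 h2,
      PySem.Dict.items_counter]
  simp [PySem.Dict.empty]

-- ===== VERDICT (by name: the statement is the Claim_ definition above) =====
theorem extra_data_spec : Claim_equal_extra_data := by
  intro data _
  show ((extra_data_freq (extra_data_pass1 data).2).items,
        (extra_data_freq (extra_data_pass2 data).2).items)
      = (((PySem.Dict.counter (((runs data).dropLast.filter (fun p => p.1)).map Prod.snd)).items),
         ((PySem.Dict.counter (((runs data).dropLast.filter (fun p => !p.1)).map Prod.snd)).items))
  rw [pass1_eq, pass2_eq, freq_items_eq, freq_items_eq, pvPass true data, pvPass false data]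
  simp
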